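-- pv_equiv track=rewrite | github.com/MrBrantCode/unitest_baseline | mut_generate/mist_train_cf/cf_27150/solution.py | validateApiKey
-- ===== SOURCE A (Python) =====
-- def validateApiKey(api_key):
--     if len(api_key) < 10:
--         return False
--     if "Type = \"apiKey\";" not in api_key:
--         return False
--     if not any(char.isupper() for char in api_key):
--         return False
--     if not any(char.islower() for char in api_key):
--         return False
--     if not any(char.isdigit() for char in api_key):
--         return False
--     return True
-- ===== SOURCE B (Python) =====
-- def validateApiKey(api_key):
--     has_upper = has_lower = has_digit = False
--     for char in api_key:
--         if char.isupper():
--             has_upper = True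
--         elif char.islower():
--             has_lower = True
--         elif char.isdigit():
--             has_digit = True
--     return (len(api_key) >= 10 and 'Type = "apiKey";' in api_key
--             and has_upper and has_lower and has_digit)
-- ===== Notes on version B (the rewrite author's own statement) =====
-- stated objective: alternative
-- what changed: Replaces A's early-return guard chain with three separate any() scans by one explicit pass over the characters maintaining three flags (mutually exclusive char classes, so elif suffices) followed by a single combined boolean return.
import Mathlib
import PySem

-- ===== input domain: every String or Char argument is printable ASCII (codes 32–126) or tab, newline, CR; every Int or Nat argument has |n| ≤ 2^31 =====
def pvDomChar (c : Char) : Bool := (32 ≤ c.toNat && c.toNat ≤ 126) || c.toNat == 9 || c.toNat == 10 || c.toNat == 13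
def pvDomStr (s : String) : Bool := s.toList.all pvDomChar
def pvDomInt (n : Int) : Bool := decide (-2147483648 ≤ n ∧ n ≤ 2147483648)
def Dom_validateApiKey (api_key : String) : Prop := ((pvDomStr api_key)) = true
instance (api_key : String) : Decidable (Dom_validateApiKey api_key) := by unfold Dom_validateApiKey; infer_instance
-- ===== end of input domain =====

-- B replaces A's guard chain with three separate any() scans by one explicit character pass
-- maintaining three flags and a single combined boolean return (objective: alternative).


-- ===== PORT A =====
def validateApiKey (api_key : String) : Bool :=
  if PySem.Str.len api_key < 10 then false
  else if !(PySem.Str.isIn "Type = \"apiKey\";" api_key) then false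
  else if !(api_key.toList.any PySem.Chars.isupper) then false
  else if !(api_key.toList.any PySem.Chars.islower) then false
  else if !(api_key.toList.any PySem.Chars.isdigit) then false
  else true

-- ===== PORT B =====
def pvFlagStep (st : Bool × Bool × Bool) (c : Char) : Bool × Bool × Bool :=
  if PySem.Chars.isupper c then (true, st.2.1, st.2.2)
  else if PySem.Chars.islower c then (st.1, true, st.2.2)
  else if PySem.Chars.isdigit c then (st.1, st.2.1, true)
  else st

def validateApiKey_alt (api_key : String) : Bool :=
  let flags := api_key.toList.foldl pvFlagStep (false, false, false)
  decide (10 ≤ PySem.Str.len api_key)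
    && PySem.Str.isIn "Type = \"apiKey\";" api_key
    && flags.1 && flags.2.1 && flags.2.2

-- ===== PRECONDITION & SPEC =====
def Spec_validateApiKey (api_key : String) (out : Bool) : Prop := out = validateApiKey_alt api_key
instance (api_key : String) (out : Bool) : Decidable (Spec_validateApiKey api_key out) := by unfold Spec_validateApiKey; infer_instance

-- ===== CLAIM (what is proved, stated in full; the proofs are below) =====
def Claim_equal_validateApiKey : Prop := ∀ (api_key : String), Dom_validateApiKey api_key → Spec_validateApiKey api_key (validateApiKey api_key)

-- ===== LEMMAS AND PROOFS =====

-- the three character classes are mutually exclusive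
theorem pv_upper_excl (c : Char) (h : PySem.Chars.isupper c = true) :
    PySem.Chars.islower c = false ∧ PySem.Chars.isdigit c = false := by
  simp [PySem.Chars.islower, PySem.Chars.isupper, PySem.Chars.isdigit, Char.le_def,
        UInt32.le_iff_toNat_le] at *
  omega

theorem pv_lower_not_digit (c : Char) (h : PySem.Chars.islower c = true) :
    PySem.Chars.isdigit c = false := by
  simp [PySem.Chars.islower, PySem.Chars.isdigit, Char.le_def, UInt32.le_iff_toNat_le] at *
  omega

-- loop invariant: the fold ORs each flag with the corresponding class membership
theorem pvFlagStep_foldl (l : List Char) (b1 b2 b3 : Bool) :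
    l.foldl pvFlagStep (b1, b2, b3)
      = (b1 || l.any PySem.Chars.isupper,
         b2 || l.any PySem.Chars.islower,
         b3 || l.any PySem.Chars.isdigit) := by
  induction l generalizing b1 b2 b3 with
  | nil => simp
  | cons c l ih =>
    simp only [List.foldl_cons, List.any_cons, pvFlagStep]
    by_cases hu : PySem.Chars.isupper c = true
    · obtain ⟨h1, h2⟩ := pv_upper_excl c hu
      simp [hu, h1, h2, ih]
    · by_cases hl : PySem.Chars.islower c = true
      · simp [hu, hl, pv_lower_not_digit c hl, ih]
      · by_cases hd : PySem.Chars.isdigit c = true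
        · simp [hu, hl, hd, ih]
        · simp [Bool.not_eq_true] at hu hl hd
          simp [hu, hl, hd, ih]

-- ===== VERDICT (by name: the statement is the Claim_ definition above) =====
theorem validateApiKey_spec : Claim_equal_validateApiKey := by
  intro api_key _
  unfold Spec_validateApiKey validateApiKey validateApiKey_alt
  rw [pvFlagStep_foldl]
  by_cases h10 : 10 ≤ api_key.length
  · have hlen : ¬ api_key.length < 10 := Nat.not_lt.mpr h10
    cases hin : PySem.Str.isIn "Type = \"apiKey\";" api_key <;>
    cases hU : api_key.toList.any PySem.Chars.isupper <;>
    cases hL : api_key.toList.any PySem.Chars.islower <;>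
    cases hD : api_key.toList.any PySem.Chars.isdigit <;>
    simp [PySem.Str.len, h10, hlen, hin, hU, hL, hD]
  · have hlen : api_key.length < 10 := Nat.lt_of_not_le h10
    simp [PySem.Str.len, h10, hlen]
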